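-- pv_equiv track=rewrite | github.com/csuf-thumbsup/assignment-3 | Main.py | beautify
-- ===== SOURCE A (Python) =====
-- def beautify(datalist):
--     beautified_text = ''
--
--     for str_line in datalist:
--         # check if line is empty space then skip
--         if str_line.isspace():
--             continue
--         # if first 2 chars are // then skip over
--         if str_line[:2] == '//':
--             continue
--         # inline comment somewhere near the end of the line
--         elif '//' in str_line:
--             # chop off that comment
--             str_line = str_line[:str_line.index('//')]
--
--         # replace terminals with spaces
--         str_list = list(str_line)
--         for char in str_list:
--             if char in [',', ';', '+', '-', '*', '/', '=']:
--                 str_list[str_list.index(char)] = ' ' + str(char) + ' '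
--
--         # rejoin list and now split by spaces so every char has proper format
--         str_list = ''.join(str_list).split()
--
--         # rejoin one last time with proper spacing
--         str_list = ' '.join(str_list)
--
--         # add beatufied str to text
--         beautified_text +=  str_list + '\n'
--
--     return beautified_text
-- ===== SOURCE B (Python) =====
-- def beautify(datalist):
--     out = []
--     for line in datalist:
--         # same skip guards as the original
--         if line.isspace():
--             continue
--         if line[:2] == '//':
--             continue
--         elif '//' in line:
--             line = line[:line.index('//')]
--         # pad every operator with spaces in one replace pass per operator,
--         # then collapse all whitespace runs with split/join
--         for op in ',;+-*/=':
--             line = line.replace(op, ' ' + op + ' ')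
--         out.append(' '.join(line.split()) + '\n')
--     return ''.join(out)
-- ===== Notes on version B (the rewrite author's own statement) =====
-- stated objective: alternative
-- what changed: The mutate-in-place inner loop (iterate over the char list, look up each operator occurrence with list.index and overwrite it) is replaced by one str.replace pass per operator that pads all its occurrences at once, followed by a single split/join whitespace collapse; the output is accumulated in a list joined once instead of repeated string concatenation.
import Mathlib
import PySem

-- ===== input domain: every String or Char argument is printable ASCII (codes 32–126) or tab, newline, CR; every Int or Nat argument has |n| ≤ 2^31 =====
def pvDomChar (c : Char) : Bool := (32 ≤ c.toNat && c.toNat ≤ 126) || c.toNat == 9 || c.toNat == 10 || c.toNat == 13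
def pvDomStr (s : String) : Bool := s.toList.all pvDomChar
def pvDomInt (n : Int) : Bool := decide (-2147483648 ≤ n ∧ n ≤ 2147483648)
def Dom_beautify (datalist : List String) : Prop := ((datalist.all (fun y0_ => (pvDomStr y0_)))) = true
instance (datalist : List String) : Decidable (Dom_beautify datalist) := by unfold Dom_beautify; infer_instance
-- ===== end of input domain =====

-- B replaces A's mutate-in-place inner loop (char list + list.index lookup per operator char)
-- by one str.replace pass per operator plus a single split/join collapse; same return value.
-- Python str values are ported at code-point level (List Char / PySem.Chars); output packed with String.ofList.

-- ===== PORT A =====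
def pvOpsA : List (List Char) := [[','], [';'], ['+'], ['-'], ['*'], ['/'], ['=']]

-- 'for char in str_list: if char in [...]: str_list[str_list.index(char)] = " " + str(char) + " "'
-- Python iterates the list it mutates by index; the length never changes, so an index loop is exact.
def pvPadLoopA (lst : List (List Char)) (i : Nat) : List (List Char) :=
  if h : i < lst.length then
    let ch := lst[i]
    if ch ∈ pvOpsA then
      match PySem.List.index? lst ch with
      | some j => pvPadLoopA (lst.set j ([' '] ++ ch ++ [' '])) (i + 1)
      | none => pvPadLoopA lst (i + 1)   -- unreachable: ch was just read from lst
    else pvPadLoopA lst (i + 1)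
  else lst
termination_by lst.length - i
decreasing_by all_goals (try simp only [List.length_set]); all_goals omega

def pvChopA (line : List Char) : List Char :=
  if PySem.Chars.isIn ['/', '/'] line then
    -- str_line[:str_line.index('//')] ; guarded by the containment test, so index = find
    PySem.Chars.slice line none (some (PySem.Chars.find line ['/', '/']))
  else line

def pvStepA (acc : List Char) (line0 : List Char) : List Char :=
  if PySem.Chars.strIsspace line0 then acc
  else if PySem.Chars.slice line0 none (some 2) = ['/', '/'] then acc
  else
    let line := pvChopA line0
    let strList := pvPadLoopA (line.map (fun c => [c])) 0
    let words := PySem.Chars.split₀ (PySem.Chars.join [] strList)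
    acc ++ PySem.Chars.join [' '] words ++ ['\n']

def beautify (datalist : List String) : String :=
  String.ofList (datalist.foldl (fun acc l => pvStepA acc l.toList) [])

-- ===== PORT B =====
def pvOpsB : List Char := [',', ';', '+', '-', '*', '/', '=']

def pvChopB (line : List Char) : List Char :=
  if PySem.Chars.isIn ['/', '/'] line then
    PySem.Chars.slice line none (some (PySem.Chars.find line ['/', '/']))
  else line

def pvLineB (line0 : List Char) : List Char :=
  let line1 := pvChopB line0
  let line2 := pvOpsB.foldl (fun l op => PySem.Chars.replace l [op] ([' '] ++ [op] ++ [' '])) line1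
  PySem.Chars.join [' '] (PySem.Chars.split₀ line2) ++ ['\n']

def beautify_alt (datalist : List String) : String :=
  String.ofList (PySem.Chars.join [] (datalist.foldl (fun out l =>
    if PySem.Chars.strIsspace l.toList then out
    else if PySem.Chars.slice l.toList none (some 2) = ['/', '/'] then out
    else out ++ [pvLineB l.toList]) []))

-- ===== PRECONDITION & SPEC =====
def Spec_beautify (datalist : List String) (out : String) : Prop := out = beautify_alt datalist
instance (datalist : List String) (out : String) : Decidable (Spec_beautify datalist out) := by unfold Spec_beautify; infer_instance

-- ===== CLAIM (what is proved, stated in full; the proofs are below) =====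
def Claim_equal_beautify : Prop := ∀ (datalist : List String), Dom_beautify datalist → Spec_beautify datalist (beautify datalist)

-- ===== LEMMAS AND PROOFS =====

-- pad a character w.r.t. an operator set given as a list of chars
def pvPadW (P : List Char) (c : Char) : List Char := if c ∈ P then [' '] ++ [c] ++ [' '] else [c]

-- A-side padding (operator test as A performs it, on singleton strings)
def pvPadA (c : Char) : List Char := if [c] ∈ pvOpsA then [' '] ++ [c] ++ [' '] else [c]

theorem pvPadA_eq_padW : pvPadA = pvPadW pvOpsB := by
  funext c; simp [pvPadA, pvPadW, pvOpsA, pvOpsB]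

-- replace with a single-char pattern is a flatMap
theorem pvReplace_go (c : Char) (new : List Char) :
    ∀ (l acc : List Char), PySem.Chars.replace.go [c] new l.length l acc
      = acc.reverse ++ l.flatMap (fun x => if x = c then new else [x]) := by
  intro l
  induction l with
  | nil => intro acc; simp only [List.length_nil]; rw [PySem.Chars.replace.go]; simp
  | cons x t ih =>
    intro acc
    rw [List.length_cons, PySem.Chars.replace.go]
    by_cases hx : x = c
    · simp [hx, List.isPrefixOf, ih]
    · simp [List.isPrefixOf, hx, Ne.symm hx, ih]

theorem pvReplace_single (c : Char) (new l : List Char) :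
    PySem.Chars.replace l [c] new = l.flatMap (fun x => if x = c then new else [x]) := by
  rw [PySem.Chars.replace]
  simp [pvReplace_go]

-- folding the per-operator replaces accumulates the pad set
theorem pvFoldRep (cs : List Char) :
    ∀ (ops P : List Char), (∀ o ∈ ops, o ∉ P) → (∀ o ∈ ops, o ≠ ' ') → ops.Nodup →
    ops.foldl (fun l op => PySem.Chars.replace l [op] ([' '] ++ [op] ++ [' '])) (cs.flatMap (pvPadW P))
      = cs.flatMap (pvPadW (ops.reverse ++ P)) := by
  intro ops
  induction ops with
  | nil => intro P _ _ _; simp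
  | cons op rest ih =>
    intro P hP hsp hnd
    have hop : op ∉ P := hP op (by simp)
    have hops : op ≠ ' ' := hsp op (by simp)
    have step : PySem.Chars.replace (cs.flatMap (pvPadW P)) [op] ([' '] ++ [op] ++ [' '])
        = cs.flatMap (pvPadW (op :: P)) := by
      rw [pvReplace_single, List.flatMap_assoc]
      apply List.flatMap_congr
      intro x _
      by_cases hxP : x ∈ P
      · have hxo : x ≠ op := fun h => hop (h ▸ hxP)
        simp [pvPadW, hxP, hxo, Ne.symm hops]
      · by_cases hxo : x = op
        · subst hxo; simp [pvPadW, hop]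
        · simp [pvPadW, hxP, hxo]
    rw [List.foldl_cons, step, ih (op :: P) ?_ ?_ ?_]
    · simp
    · intro o ho; simp only [List.mem_cons]
      rintro (h | h)
      · exact (List.nodup_cons.mp hnd).1 (h ▸ ho)
      · exact hP o (by simp [ho]) h
    · intro o ho; exact hsp o (by simp [ho])
    · exact (List.nodup_cons.mp hnd).2

theorem pvPadW_nil : pvPadW [] = fun c => [c] := by funext c; simp [pvPadW]

theorem pvLineB_pad (cs : List Char) :
    pvOpsB.foldl (fun l op => PySem.Chars.replace l [op] ([' '] ++ [op] ++ [' '])) cs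
      = cs.flatMap pvPadA := by
  have h0 : cs = cs.flatMap (pvPadW []) := by rw [pvPadW_nil]; exact (List.flatMap_singleton' cs).symm
  rw [pvPadA_eq_padW]
  conv_lhs => rw [h0]
  rw [pvFoldRep cs pvOpsB [] (by simp) (by simp [pvOpsB]) (by simp [pvOpsB])]
  apply List.flatMap_congr
  intro x _
  simp only [pvPadW, pvOpsB, List.mem_cons, List.mem_nil_iff, List.reverse_cons,
    List.reverse_nil, List.nil_append, List.cons_append, List.append_nil, or_false]
  exact if_congr (by tauto) rfl rfl

theorem pvJoin_nil (parts : List (List Char)) : PySem.Chars.join [] parts = parts.flatten := by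
  rw [PySem.Chars.join]
  induction parts with
  | nil => simp [List.intercalate]
  | cons x t ih =>
    cases t with
    | nil => simp [List.intercalate]
    | cons y s =>
      rw [List.intercalate] at ih ⊢
      simp at ih ⊢
      exact ih

-- setting at the junction of an append
theorem pvSet_append (pre : List (List Char)) (v x : List Char) (suf : List (List Char)) :
    (pre ++ x :: suf).set pre.length v = pre ++ v :: suf := by
  induction pre with
  | nil => simp
  | cons a t ih => simp [ih]

theorem pvTake_succ (cs : List Char) (i : Nat) (h : i < cs.length) :
    cs.take (i + 1) = cs.take i ++ [cs[i]] := by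
  rw [List.take_add_one]
  simp [List.getElem?_eq_getElem h]

-- loop invariant for A's index-mutation loop: positions before i are already padded,
-- positions from i on are still the original singleton strings
theorem pvPadLoopA_inv :
    ∀ (n : Nat) (cs : List Char) (i : Nat), n = cs.length - i → i ≤ cs.length →
    pvPadLoopA ((cs.take i).map pvPadA ++ (cs.drop i).map (fun c => [c])) i = cs.map pvPadA := by
  intro n
  induction n with
  | zero =>
    intro cs i hn hi
    have hie : i = cs.length := by omega
    subst hie
    rw [pvPadLoopA]
    simp
  | succ n ih =>
    intro cs i hn hi
    have hlt : i < cs.length := by omega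
    set x := cs[i] with hx
    set pre := (cs.take i).map pvPadA with hpre
    set suf := (cs.drop (i + 1)).map (fun c => ([c] : List Char)) with hsuf
    have hprelen : pre.length = i := by
      simp [hpre, List.length_take, Nat.min_eq_left hi]
    have hform : (cs.drop i).map (fun c => ([c] : List Char)) = [x] :: suf := by
      rw [List.drop_eq_getElem_cons hlt, List.map_cons]
    rw [hform]
    have hlen' : i < (pre ++ [x] :: suf).length := by
      simp [hprelen]
    rw [pvPadLoopA, dif_pos hlen']
    have hget : (pre ++ [x] :: suf)[i]'hlen' = [x] := by
      rw [List.getElem_append_right (by omega)]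
      simp [hprelen]
    simp only [hget]
    have hnext : ∀ v : List Char, v = pvPadA x →
        pre ++ v :: suf
          = (cs.take (i + 1)).map pvPadA ++ (cs.drop (i + 1)).map (fun c => [c]) := by
      intro v hv
      rw [pvTake_succ cs i hlt, List.map_append, List.map_cons]
      simp [hpre, hsuf, hv, hx]
    by_cases hop : ([x] : List Char) ∈ pvOpsA
    · rw [if_pos hop]
      have hnotpre : ([x] : List Char) ∉ pre := by
        intro hmem
        obtain ⟨c', _, heq⟩ := List.mem_map.mp hmem
        by_cases hc : ([c'] : List Char) ∈ pvOpsA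
        · rw [pvPadA, if_pos hc] at heq
          simp at heq
        · rw [pvPadA, if_neg hc] at heq
          simp at heq
          exact hc (heq ▸ hop)
      have hidx : PySem.List.index? (pre ++ [x] :: suf) [x] = some i := by
        rw [PySem.List.index?_eq_some_iff]
        exact ⟨pre, suf, rfl, hprelen, hnotpre⟩
      rw [hidx]
      show pvPadLoopA ((pre ++ [x] :: suf).set i ([' '] ++ [x] ++ [' '])) (i + 1) = List.map pvPadA cs
      have hset : (pre ++ [x] :: suf).set i ([' '] ++ [x] ++ [' ']) = pre ++ ([' '] ++ [x] ++ [' ']) :: suf := by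
        rw [← hprelen, pvSet_append]
      rw [hset, hnext _ (by rw [pvPadA, if_pos hop])]
      exact ih cs (i + 1) (by omega) (by omega)
    · rw [if_neg hop]
      rw [hnext [x] (by rw [pvPadA, if_neg hop])]
      exact ih cs (i + 1) (by omega) (by omega)

theorem pvA_line (cs : List Char) :
    PySem.Chars.join [] (pvPadLoopA (cs.map (fun c => [c])) 0) = cs.flatMap pvPadA := by
  have h := pvPadLoopA_inv cs.length cs 0 (by omega) (by omega)
  simp only [List.take_zero, List.map_nil, List.nil_append, List.drop_zero] at h
  rw [h, pvJoin_nil]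
  exact List.flatMap_def.symm

theorem pvStep_eq (acc : List Char) (l : List Char) (h1 : ¬ PySem.Chars.strIsspace l = true)
    (h2 : ¬ PySem.Chars.slice l none (some 2) = ['/', '/']) :
    pvStepA acc l = acc ++ pvLineB l := by
  rw [pvStepA, if_neg h1, if_neg h2, pvLineB]
  dsimp only
  have hchop : pvChopA l = pvChopB l := rfl
  rw [hchop, pvA_line, ← pvLineB_pad, List.append_assoc]

theorem pvFold_eq (ls : List String) :
    ∀ (accB : List (List Char)),
    ls.foldl (fun acc l => pvStepA acc l.toList) (PySem.Chars.join [] accB)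
      = PySem.Chars.join [] (ls.foldl (fun out l =>
          if PySem.Chars.strIsspace l.toList then out
          else if PySem.Chars.slice l.toList none (some 2) = ['/', '/'] then out
          else out ++ [pvLineB l.toList]) accB) := by
  induction ls with
  | nil => intro accB; simp
  | cons l t ih =>
    intro accB
    simp only [List.foldl_cons]
    by_cases h1 : PySem.Chars.strIsspace l.toList = true
    · rw [if_pos h1]
      have hs : pvStepA (PySem.Chars.join [] accB) l.toList = PySem.Chars.join [] accB := by
        rw [pvStepA, if_pos h1]
      rw [hs, ih]
    · rw [if_neg h1]
      by_cases h2 : PySem.Chars.slice l.toList none (some 2) = ['/', '/']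
      · rw [if_pos h2]
        have hs : pvStepA (PySem.Chars.join [] accB) l.toList = PySem.Chars.join [] accB := by
          rw [pvStepA, if_neg h1, if_pos h2]
        rw [hs, ih]
      · rw [if_neg h2]
        rw [pvStep_eq _ _ h1 h2]
        have hj : PySem.Chars.join [] accB ++ pvLineB l.toList
            = PySem.Chars.join [] (accB ++ [pvLineB l.toList]) := by
          simp [pvJoin_nil]
        rw [hj, ih]

-- ===== VERDICT (by name: the statement is the Claim_ definition above) =====
theorem beautify_spec : Claim_equal_beautify := by
  intro datalist _
  unfold Spec_beautify beautify beautify_alt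
  have h := pvFold_eq datalist []
  simp only [pvJoin_nil, List.flatten_nil] at h
  rw [h, pvJoin_nil]
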